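-- pv_equiv track=rewrite | github.com/franmassello/utn | TP2.py | caracter_arroba
-- ===== SOURCE A (Python) =====
-- def caracter_arroba(mail):
--     valido = False
--     conta_arroba = 0
--     if mail == "":
--         return valido
--     if mail[0] == "@" or mail[-1] == "@":
--         return valido
--     for car in mail:
--         if car == "@":
--             conta_arroba += 1
--     if conta_arroba < 1 or conta_arroba > 1:
--         return valido
--     valido = True
--     return valido
-- ===== SOURCE B (Python) =====
-- def caracter_arroba(mail):
--     parts = mail.split('@')
--     return len(parts) == 2 and parts[0] != '' and parts[1] != ''
-- ===== Notes on version B (the rewrite author's own statement) =====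
-- stated objective: idiomatic
-- what changed: Replaces A's empty-string guard, edge-character guards and manual counting loop over the characters with a single str.split on the separator followed by a check for exactly two non-empty parts.
import Mathlib
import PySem

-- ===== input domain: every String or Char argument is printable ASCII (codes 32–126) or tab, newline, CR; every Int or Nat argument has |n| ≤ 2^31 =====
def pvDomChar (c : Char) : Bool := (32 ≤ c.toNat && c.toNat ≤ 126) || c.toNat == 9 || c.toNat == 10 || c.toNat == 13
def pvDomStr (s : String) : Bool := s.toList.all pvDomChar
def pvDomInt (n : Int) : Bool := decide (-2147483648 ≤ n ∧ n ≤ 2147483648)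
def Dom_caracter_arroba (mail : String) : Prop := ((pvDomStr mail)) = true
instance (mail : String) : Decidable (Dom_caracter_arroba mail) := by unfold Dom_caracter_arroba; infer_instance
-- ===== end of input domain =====

-- B replaces A's empty-string guard, edge-character guards and manual '@'-counting loop by a
-- single split on '@' followed by a check for exactly two non-empty parts (idiomatic; same cost).

-- ===== PORT A =====
def caracter_arroba (mail : String) : Bool :=
  let valido := false
  let conta_arroba : Int := 0
  if mail == "" then valido
  else if PySem.Str.pyGet? mail 0 == some '@' || PySem.Str.pyGet? mail (-1) == some '@' then
    valido
  else
    let conta := mail.toList.foldl (fun acc car => if car == '@' then acc + 1 else acc) conta_arroba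
    if conta < 1 || conta > 1 then valido
    else true

-- ===== PORT B =====
def caracter_arroba_alt (mail : String) : Bool :=
  match PySem.Str.split? mail "@" with
  | none => false
  | some parts =>
    match parts with
    | [a, b] => !(a == "") && !(b == "")
    | _ => false


-- ===== PRECONDITION & SPEC =====
def Spec_caracter_arroba (mail : String) (out : Bool) : Prop := out = caracter_arroba_alt mail
instance (mail : String) (out : Bool) : Decidable (Spec_caracter_arroba mail out) := by unfold Spec_caracter_arroba; infer_instance

-- ===== CLAIM (what is proved, stated in full; the proofs are below) =====
def Claim_equal_caracter_arroba : Prop := ∀ (mail : String), Dom_caracter_arroba mail → Spec_caracter_arroba mail (caracter_arroba mail)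

-- ===== LEMMAS AND PROOFS =====

def splitChar : List Char → List Char → List (List Char)
  | [], cur => [cur.reverse]
  | c :: rest, cur =>
    if c = '@' then cur.reverse :: splitChar rest []
    else splitChar rest (c :: cur)

theorem splitChar_ne_nil : ∀ (cs cur : List Char), splitChar cs cur ≠ [] := by
  intro cs
  induction cs with
  | nil => intro cur; simp [splitChar]
  | cons c rest ih =>
    intro cur
    by_cases hc : c = '@' <;> simp [splitChar, hc, ih]

theorem go_step (n : Nat) (c : Char) (rest cur : List Char) (acc : List (List Char)) :
    PySem.Chars.splitOn.go ['@'] (n+1) (c :: rest) cur acc =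
      (if ['@'].isPrefixOf (c :: rest) then
        PySem.Chars.splitOn.go ['@'] n (List.drop 1 (c :: rest)) [] (cur.reverse :: acc)
      else PySem.Chars.splitOn.go ['@'] n rest (c :: cur) acc) := rfl

theorem splitOn_go_eq_splitChar :
    ∀ (fuel : Nat) (l cur : List Char) (acc : List (List Char)), l.length < fuel →
      PySem.Chars.splitOn.go ['@'] fuel l cur acc = acc.reverse ++ splitChar l cur := by
  intro fuel
  induction fuel with
  | zero => intro l cur acc h; omega
  | succ n ih =>
    intro l cur acc h
    cases l with
    | nil => show (cur.reverse :: acc).reverse = _; simp [splitChar]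
    | cons c rest =>
      rw [go_step]
      by_cases hc : c = '@'
      · subst hc
        rw [if_pos (by simp [List.isPrefixOf]), List.drop_one, List.tail_cons]
        rw [ih rest [] (cur.reverse :: acc) (by simp at h ⊢; omega)]
        simp [splitChar]
      · rw [if_neg (by simp [List.isPrefixOf, Ne.symm hc])]
        rw [ih rest (c :: cur) acc (by simp at h ⊢; omega)]
        simp [splitChar, hc]

theorem splitOn_eq_splitChar (cs : List Char) :
    PySem.Chars.splitOn cs ['@'] = splitChar cs [] := by
  unfold PySem.Chars.splitOn
  rw [splitOn_go_eq_splitChar (cs.length + 1) cs [] [] (Nat.lt_succ_self _)]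
  simp

theorem splitChar_eq_singleton (cs : List Char) :
    ∀ (cur a : List Char), splitChar cs cur = [a] ↔ '@' ∉ cs ∧ a = cur.reverse ++ cs := by
  induction cs with
  | nil => intro cur a; simp [splitChar, eq_comm]
  | cons c rest ih =>
    intro cur a
    by_cases hc : c = '@'
    · subst hc
      simp only [splitChar]
      rw [if_pos trivial]
      constructor
      · intro h
        have := congrArg List.length h
        simp at this
        exact absurd this (splitChar_ne_nil rest [])
      · rintro ⟨hmem, -⟩; exact absurd (List.mem_cons_self) hmem
    · simp only [splitChar, if_neg hc]
      rw [ih (c :: cur) a]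
      constructor
      · rintro ⟨hm, ha⟩
        exact ⟨by simp [hm]; exact fun h => hc h.symm, by simpa using ha⟩
      · rintro ⟨hm, ha⟩
        exact ⟨fun h => hm (by simp [h]), by simpa using ha⟩

theorem splitChar_eq_pair (cs : List Char) :
    ∀ (cur a b : List Char), splitChar cs cur = [a, b] ↔
      ∃ u v, cs = u ++ '@' :: v ∧ '@' ∉ u ∧ '@' ∉ v ∧ a = cur.reverse ++ u ∧ b = v := by
  induction cs with
  | nil =>
    intro cur a b
    simp only [splitChar]
    constructor
    · intro h; simp at h
    · rintro ⟨u, v, h, -⟩; simp at h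
  | cons c rest ih =>
    intro cur a b
    by_cases hc : c = '@'
    · subst hc
      simp only [splitChar]
      rw [if_pos trivial]
      constructor
      · intro h
        rw [List.cons.injEq] at h
        obtain ⟨h1, h2⟩ := h
        rw [splitChar_eq_singleton] at h2
        exact ⟨[], rest, by simp, by simp, h2.1, by simp [h1], by simpa using h2.2⟩
      · rintro ⟨u, v, hcs, hu, hv, ha, hb⟩
        have hu0 : u = [] := by
          cases u with
          | nil => rfl
          | cons x xs =>
            rw [List.cons_append, List.cons.injEq] at hcs
            exact absurd (hcs.1.symm ▸ List.mem_cons_self) hu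
        subst hu0
        simp only [List.nil_append, List.cons.injEq] at hcs
        rw [List.cons.injEq]
        refine ⟨by simp [ha], ?_⟩
        rw [splitChar_eq_singleton]
        exact ⟨hcs.2 ▸ hv, by simp [hb, hcs.2]⟩
    · simp only [splitChar, if_neg hc]
      rw [ih (c :: cur) a b]
      constructor
      · rintro ⟨u, v, hcs, hu, hv, ha, hb⟩
        refine ⟨c :: u, v, by simp [hcs], ?_, hv, by simpa using ha, hb⟩
        simp [hu]; exact fun h => hc h.symm
      · rintro ⟨u, v, hcs, hu, hv, ha, hb⟩
        cases u with
        | nil =>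
          simp only [List.nil_append, List.cons.injEq] at hcs
          exact absurd hcs.1 hc
        | cons x xs =>
          rw [List.cons_append, List.cons.injEq] at hcs
          refine ⟨xs, v, hcs.2, fun h => hu (by simp [h]), hv, ?_, hb⟩
          simp [ha, hcs.1]

theorem foldl_count (cs : List Char) : ∀ (n : Int),
    cs.foldl (fun acc car => if car == '@' then acc + 1 else acc) n = n + cs.count '@' := by
  induction cs with
  | nil => intro n; simp
  | cons c rest ih =>
    intro n
    rw [List.foldl_cons]
    by_cases hc : (c == '@') = true
    · rw [if_pos hc, ih]
      have hc' : c = '@' := by simpa using hc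
      simp [List.count_cons, hc']
      push_cast
      ring
    · rw [if_neg hc, ih]
      have hc' : ¬ c = '@' := by simpa using hc
      simp [List.count_cons, hc']

theorem pyGet_neg_one (cs : List Char) (h : cs ≠ []) :
    PySem.List.pyGet? cs (-1) = cs.getLast? := by
  have hlen : 1 ≤ cs.length := List.length_pos_iff.mpr h
  simp only [PySem.List.pyGet?, PySem.List.pyIdx?]
  rw [if_neg (by omega), if_pos (by exact_mod_cast by omega)]
  rw [List.getLast?_eq_getElem?]
  simp

theorem count_one_decomp {cs : List Char} (h : cs.count '@' = 1) :
    ∃ u v, cs = u ++ '@' :: v ∧ '@' ∉ u ∧ '@' ∉ v := by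
  have hmem : '@' ∈ cs := by
    by_contra hm
    rw [List.count_eq_zero_of_not_mem hm] at h; omega
  obtain ⟨u, v, rfl⟩ := List.append_of_mem hmem
  rw [List.count_append, List.count_cons_self] at h
  exact ⟨u, v, rfl, List.count_eq_zero.mp (by omega), List.count_eq_zero.mp (by omega)⟩

theorem main_eq (mail : String) : caracter_arroba mail = caracter_arroba_alt mail := by
  have hB : caracter_arroba_alt mail =
      (match splitChar mail.toList [] with
        | [a, b] => !(a.isEmpty) && !(b.isEmpty)
        | _ => false) := by
    unfold caracter_arroba_alt
    rw [show PySem.Str.split? mail "@" =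
        Option.map (fun x => List.map String.ofList x) (PySem.Chars.split? mail.toList ['@']) from rfl]
    rw [show PySem.Chars.split? mail.toList ['@'] = some (PySem.Chars.splitOn mail.toList ['@']) from rfl]
    rw [splitOn_eq_splitChar]
    cases hsp : splitChar mail.toList [] with
    | nil => simp
    | cons a t =>
      cases t with
      | nil => simp
      | cons b t2 =>
        cases t2 with
        | nil =>
          simp only [Option.map_some, List.map]
          have hs : ∀ (l : List Char), (String.ofList l == "") = l.isEmpty := by
            intro l
            cases l with
            | nil => rfl
            | cons c t =>
              simp only [List.isEmpty_cons, beq_eq_false_iff_ne]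
              intro h
              have := congrArg String.toList h
              rw [String.toList_ofList] at this
              simp at this
          simp [hs]
        | cons x xs => simp
  rw [hB]
  unfold caracter_arroba
  by_cases hnil : mail = ""
  · subst hnil; simp [splitChar]
  · have hcs : mail.toList ≠ [] := by
      intro h
      exact hnil (by simpa using h)
    cases hl : mail.toList with
    | nil => exact absurd hl hcs
    | cons c rest =>
      have hget0 : PySem.Str.pyGet? mail 0 = some c := by
        simp [PySem.Str.pyGet?, hl, PySem.List.pyGet?, PySem.List.pyIdx?]
      have hgetlast : PySem.Str.pyGet? mail (-1) = (c :: rest).getLast? := by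
        have : PySem.Str.pyGet? mail (-1) = PySem.List.pyGet? mail.toList (-1) := by
          simp [PySem.Str.pyGet?]
        rw [this, hl, pyGet_neg_one (c :: rest) (by simp)]
      rw [hget0, hgetlast, if_neg (show ¬((mail == "") = true) from by simpa using hnil)]
      by_cases hc0 : c = '@'
      · subst hc0
        rw [if_pos (by simp)]
        simp only [splitChar]
        rw [if_pos trivial]
        cases hsp : splitChar rest [] with
        | nil => simp
        | cons b t => cases t <;> simp
      · by_cases hlast : (c :: rest).getLast? = some '@'
        · rw [if_pos (by simp [hlast])]
          cases hsp : splitChar (c :: rest) [] with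
          | nil => simp
          | cons a t =>
            cases t with
            | nil => simp
            | cons b t2 =>
              cases t2 with
              | cons x xs => simp
              | nil =>
                rw [splitChar_eq_pair] at hsp
                obtain ⟨u, v, hcs2, hu, hv, ha, hb⟩ := hsp
                have hv0 : b = [] := by
                  rcases List.eq_nil_or_concat v with h | ⟨v', e, rfl⟩
                  · rw [hb, h]
                  · exfalso
                    have hle : (c :: rest).getLast? = some e := by
                      rw [hcs2, show u ++ '@' :: v'.concat e = (u ++ '@' :: v').concat e from by simp,
                        List.concat_eq_append, List.getLast?_append]
                      simp
                    rw [hlast] at hle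
                    have he : e = '@' := by injection hle with h'; exact h'.symm
                    subst he
                    exact hv (by simp)
                simp [hv0]
        · rw [if_neg (by simp [hc0, hlast])]
          rw [foldl_count]
          by_cases hcount : (c :: rest).count '@' = 1
          · obtain ⟨u, v, hcs2, hu, hv⟩ := count_one_decomp hcount
            have hu0 : u ≠ [] := by
              intro h; subst h
              simp only [List.nil_append, List.cons.injEq] at hcs2
              exact hc0 hcs2.1
            have hv0 : v ≠ [] := by
              intro h; subst h
              exact hlast (by rw [hcs2]; simp)
            have hthis : splitChar (c :: rest) [] = [u, v] := by
              rw [splitChar_eq_pair]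
              exact ⟨u, v, hcs2, hu, hv, by simp, rfl⟩
            rw [hthis]
            rw [if_neg (by simp [hcount])]
            simp [hu0, hv0]
          · rw [if_pos (by
              have h01 : (c :: rest).count '@' = 0 ∨ 2 ≤ (c :: rest).count '@' := by omega
              rcases h01 with h | h
              · simp [h]
              · simp only [Bool.or_eq_true, decide_eq_true_eq]
                right
                push_cast
                omega)]
            cases hsp : splitChar (c :: rest) [] with
            | nil => simp
            | cons a t =>
              cases t with
              | nil => simp
              | cons b t2 =>
                cases t2 with
                | cons x xs => simp
                | nil =>
                  exfalso
                  rw [splitChar_eq_pair] at hsp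
                  obtain ⟨u, v, hcs2, hu, hv, -, -⟩ := hsp
                  apply hcount
                  rw [hcs2, List.count_append, List.count_cons_self,
                    List.count_eq_zero.mpr hu, List.count_eq_zero.mpr hv]

-- ===== VERDICT (by name: the statement is the Claim_ definition above) =====
theorem caracter_arroba_spec : Claim_equal_caracter_arroba := by
  intro mail _
  unfold Spec_caracter_arroba
  exact main_eq mail
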